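-- pv_equiv track=rewrite | github.com/infinityworks/snail-x-feed-handler | feed/repositories/round_result_repository.py | calculate_user_score
-- ===== SOURCE A (Python) =====
-- def calculate_user_score(relevant_race_results):
--     score = 0
--     for race_result in relevant_race_results:
--         if race_result[0] == 1:
--             score += 5
--         elif race_result[0] == 2:
--             score += 3
--         elif race_result[0] == 3:
--             score += 1
--     return score
-- ===== SOURCE B (Python) =====
-- def calculate_user_score(relevant_race_results):
--     firsts = [race_result[0] for race_result in relevant_race_results]
--     return firsts.count(1) * 5 + firsts.count(2) * 3 + firsts.count(3)
-- ===== Notes on version B (the rewrite author's own statement) =====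
-- stated objective: alternative
-- what changed: B replaces A's per-element branch-and-accumulate loop with an aggregate-then-combine structure: extract the placement column, count occurrences of 1/2/3, and return the closed weighted sum 5*c1+3*c2+c3.
import Mathlib
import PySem

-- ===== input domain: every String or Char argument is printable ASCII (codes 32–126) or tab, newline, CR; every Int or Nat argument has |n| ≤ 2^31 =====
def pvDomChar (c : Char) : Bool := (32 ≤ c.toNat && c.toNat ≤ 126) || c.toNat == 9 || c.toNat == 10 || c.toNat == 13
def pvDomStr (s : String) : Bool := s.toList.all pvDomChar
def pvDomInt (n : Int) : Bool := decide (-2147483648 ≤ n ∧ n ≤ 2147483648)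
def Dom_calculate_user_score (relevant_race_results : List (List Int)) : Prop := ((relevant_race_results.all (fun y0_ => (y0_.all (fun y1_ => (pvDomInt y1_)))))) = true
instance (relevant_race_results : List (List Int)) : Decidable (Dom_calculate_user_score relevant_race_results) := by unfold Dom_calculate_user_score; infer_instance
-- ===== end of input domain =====

-- B replaces A's per-element branch-and-accumulate loop with count-then-weighted-sum (objective: alternative decomposition).

-- ===== PORT A =====
-- race_result[0] is PySem.List.pyGet?; the 'none' (IndexError) case is excluded by Pre_.
def calculate_user_score (relevant_race_results : List (List Int)) : Int :=
  relevant_race_results.foldl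
    (fun (score : Int) (race_result : List Int) =>
      match PySem.List.pyGet? race_result 0 with
      | none => score        -- IndexError in Python; unreachable under Pre_
      | some x =>
        if x = 1 then score + 5
        else if x = 2 then score + 3
        else if x = 3 then score + 1
        else score) (0 : Int)

-- ===== PORT B =====
def calculate_user_score_alt (relevant_race_results : List (List Int)) : Int :=
  let firsts := relevant_race_results.map (fun race_result => (PySem.List.pyGet? race_result 0).getD 0)
  (PySem.List.count firsts 1 : Int) * 5 + (PySem.List.count firsts 2 : Int) * 3 + (PySem.List.count firsts 3 : Int)

-- ===== PRECONDITION & SPEC =====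
-- Pre_ excludes exactly the inputs where A raises IndexError: an empty inner list (race_result[0]).
def Pre_calculate_user_score (relevant_race_results : List (List Int)) : Prop :=
  ∀ r ∈ relevant_race_results, r ≠ []
instance (relevant_race_results : List (List Int)) : Decidable (Pre_calculate_user_score relevant_race_results) := by unfold Pre_calculate_user_score; infer_instance
def pvWitness_calculate_user_score : List (List Int) := [[1, 7], [4], [3], [2]]

def Spec_calculate_user_score (relevant_race_results : List (List Int)) (out : Int) : Prop := out = calculate_user_score_alt relevant_race_results
instance (relevant_race_results : List (List Int)) (out : Int) : Decidable (Spec_calculate_user_score relevant_race_results out) := by unfold Spec_calculate_user_score; infer_instance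

-- ===== CLAIM (what is proved, stated in full; the proofs are below) =====
def Claim_equal_calculate_user_score : Prop := ∀ (relevant_race_results : List (List Int)), Dom_calculate_user_score relevant_race_results → Pre_calculate_user_score relevant_race_results → Spec_calculate_user_score relevant_race_results (calculate_user_score relevant_race_results)

-- ===== LEMMAS AND PROOFS =====
theorem calculate_user_score_shift (rs : List (List Int)) (s : Int) :
    rs.foldl
      (fun score race_result =>
        match PySem.List.pyGet? race_result 0 with
        | none => score
        | some x =>
          if x = 1 then score + 5
          else if x = 2 then score + 3
          else if x = 3 then score + 1
          else score) s
    = s + rs.foldl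
      (fun score race_result =>
        match PySem.List.pyGet? race_result 0 with
        | none => score
        | some x =>
          if x = 1 then score + 5
          else if x = 2 then score + 3
          else if x = 3 then score + 1
          else score) 0 := by
  induction rs generalizing s with
  | nil => simp
  | cons r t ih =>
    simp only [List.foldl_cons]
    rw [ih, ih (match PySem.List.pyGet? r 0 with
      | none => (0 : Int)
      | some x => if x = 1 then 0 + 5 else if x = 2 then 0 + 3 else if x = 3 then 0 + 1 else 0)]
    cases PySem.List.pyGet? r 0 with
    | none => dsimp only; ring
    | some x => dsimp only; split_ifs <;> ring

theorem calculate_user_score_eq_alt (rs : List (List Int)) :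
    calculate_user_score rs = calculate_user_score_alt rs := by
  induction rs with
  | nil => simp [calculate_user_score, calculate_user_score_alt, PySem.List.count]
  | cons r t ih =>
    simp only [calculate_user_score, calculate_user_score_alt, List.foldl_cons, List.map_cons] at *
    rw [calculate_user_score_shift]
    cases h : PySem.List.pyGet? r 0 with
    | none =>
      simp only [Option.getD_none]
      rw [ih]
      simp only [PySem.List.count, List.count_cons]
      norm_num
    | some x =>
      simp only [Option.getD_some]
      rw [ih]
      simp only [PySem.List.count, List.count_cons]
      split_ifs with h1 h2 h3 <;>
        simp_all <;> ring

-- ===== VERDICT (by name: the statement is the Claim_ definition above) =====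
theorem calculate_user_score_spec : Claim_equal_calculate_user_score := by
  intro rs _ _
  exact calculate_user_score_eq_alt rs
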